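-- pv_equiv track=rewrite | github.com/JonusNattapong/DekDataset | src/python/generate_dataset.py | balance_label_entries
-- ===== SOURCE A (Python) =====
-- def balance_label_entries(
--     entries: list, label_field: str, labels: list, n_per_label: int
-- ) -> list:
--     """Balance dataset so each label has up to n_per_label entries."""
--     from collections import defaultdict
--
--     buckets = defaultdict(list)
--     for e in entries:
--         label = e.get(label_field)
--         if label in labels:
--             buckets[label].append(e)
--     balanced = []
--     for label in labels:
--         balanced.extend(buckets[label][:n_per_label])
--     return balanced
-- ===== SOURCE B (Python) =====
-- def balance_label_entries(
--     entries: list, label_field: str, labels: list, n_per_label: int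
-- ) -> list:
--     """Balance dataset so each label has up to n_per_label entries."""
--     balanced = []
--     for label in labels:
--         matches = [e for e in entries if e.get(label_field) == label]
--         balanced.extend(matches[:n_per_label])
--     return balanced
-- ===== Notes on version B (the rewrite author's own statement) =====
-- stated objective: simpler
-- what changed: Drops the defaultdict index-building pass entirely: B loops over labels and filters entries per label, taking the first n_per_label by slicing.
import Mathlib
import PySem

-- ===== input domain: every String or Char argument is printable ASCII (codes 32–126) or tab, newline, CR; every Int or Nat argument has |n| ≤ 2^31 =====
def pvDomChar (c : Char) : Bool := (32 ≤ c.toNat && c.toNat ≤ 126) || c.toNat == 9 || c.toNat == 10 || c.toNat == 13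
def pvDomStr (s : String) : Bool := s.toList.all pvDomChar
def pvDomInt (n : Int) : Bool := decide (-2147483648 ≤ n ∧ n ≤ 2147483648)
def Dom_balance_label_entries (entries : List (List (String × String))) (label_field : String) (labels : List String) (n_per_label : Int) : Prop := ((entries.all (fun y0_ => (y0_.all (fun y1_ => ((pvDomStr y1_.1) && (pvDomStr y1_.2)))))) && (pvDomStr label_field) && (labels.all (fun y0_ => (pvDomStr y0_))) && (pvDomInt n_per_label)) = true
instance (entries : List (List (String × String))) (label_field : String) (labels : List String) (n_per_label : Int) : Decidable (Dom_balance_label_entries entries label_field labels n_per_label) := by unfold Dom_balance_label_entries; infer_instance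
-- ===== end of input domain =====

-- ===== PORT A =====
-- B changes structure only (no defaultdict index; per-label filter + slice); objective: simpler.
-- helper: one step of A's bucket-building loop over `entries`
def pvBucketStep (label_field : String) (labels : List String)
    (d : PySem.Dict String (List (List (String × String)))) (e : List (String × String)) :
    PySem.Dict String (List (List (String × String))) :=
  match (PySem.Dict.mk e).get? label_field with
  | some l => if l ∈ labels then d.modify l [] (· ++ [e]) else d
  | none => d

def balance_label_entries (entries : List (List (String × String))) (label_field : String) (labels : List String) (n_per_label : Int) : List (List (String × String)) :=
  let buckets := entries.foldl (pvBucketStep label_field labels) PySem.Dict.empty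
  labels.foldl (fun balanced label =>
    balanced ++ PySem.List.slice (buckets.getD label []) none (some n_per_label)) []

-- ===== PORT B =====
def balance_label_entries_alt (entries : List (List (String × String))) (label_field : String) (labels : List String) (n_per_label : Int) : List (List (String × String)) :=
  labels.foldl (fun balanced label =>
    balanced ++ PySem.List.slice
      (entries.filter (fun e => (PySem.Dict.mk e).get? label_field == some label))
      none (some n_per_label)) []

-- ===== PRECONDITION & SPEC =====
def Spec_balance_label_entries (entries : List (List (String × String))) (label_field : String) (labels : List String) (n_per_label : Int) (out : List (List (String × String))) : Prop := out = balance_label_entries_alt entries label_field labels n_per_label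
instance (entries : List (List (String × String))) (label_field : String) (labels : List String) (n_per_label : Int) (out : List (List (String × String))) : Decidable (Spec_balance_label_entries entries label_field labels n_per_label out) := by unfold Spec_balance_label_entries; infer_instance

-- ===== CLAIM (what is proved, stated in full; the proofs are below) =====
def Claim_equal_balance_label_entries : Prop := ∀ (entries : List (List (String × String))) (label_field : String) (labels : List String) (n_per_label : Int), Dom_balance_label_entries entries label_field labels n_per_label → Spec_balance_label_entries entries label_field labels n_per_label (balance_label_entries entries label_field labels n_per_label)

-- ===== LEMMAS AND PROOFS =====

-- A's bucket for any label in `labels` is exactly B's filter of `entries`.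
theorem pvBucket_getD (label_field : String) (labels : List String)
    (entries : List (List (String × String)))
    (d : PySem.Dict String (List (List (String × String))))
    (l : String) (hl : l ∈ labels) :
    (entries.foldl (pvBucketStep label_field labels) d).getD l []
      = d.getD l [] ++ entries.filter (fun e => (PySem.Dict.mk e).get? label_field == some l) := by
  induction entries generalizing d with
  | nil => simp
  | cons e es ih =>
    simp only [List.foldl_cons, List.filter_cons]
    cases hopt : (PySem.Dict.mk e).get? label_field with
    | none =>
      simp [pvBucketStep, hopt, ih]
    | some x =>
      by_cases hxl : x ∈ labels
      · by_cases hx : x = l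
        · subst hx
          simp [pvBucketStep, hopt, hxl, ih, PySem.Dict.getD_modify_self]
        · simp [pvBucketStep, hopt, hxl, ih, PySem.Dict.getD_modify, hx, Ne.symm hx]
      · have hx : x ≠ l := fun h => hxl (h ▸ hl)
        simp [pvBucketStep, hopt, hxl, ih, hx]

-- ===== VERDICT (by name: the statement is the Claim_ definition above) =====
theorem balance_label_entries_spec : Claim_equal_balance_label_entries := by
  intro entries label_field labels n_per_label _
  unfold Spec_balance_label_entries balance_label_entries balance_label_entries_alt
  refine PySem.List.foldl_congr_mem _ _ _ _ (fun acc l hl => ?_)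
  rw [pvBucket_getD label_field labels entries PySem.Dict.empty l hl]
  simp
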